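-- pv_equiv track=rewrite | github.com/dyshko/hackerrank | World Codesprint 13/P4.py | fewestOperationsToBalance
-- ===== SOURCE A (Python) =====
-- def fewestOperationsToBalance(s):
--     rs  = []
--     for c in s:
--         if c == '(':
--             rs.append(c)
--         if c == ')':
--             if len(rs) > 0 and rs[-1] == '(':
--                 rs.pop()
--             else:
--                 rs.append(c)
--
--     a = rs.count(')')
--     b = len(rs) - a
--
--     if a==b:
--         if a==0:
--             return 0
--         else:
--             return 2
--     else:
--         a, b = max(a,b), min(a,b)
--         if b == 0:
--             return 1
--         else:
--             return 2
--
--     return 0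
-- ===== SOURCE B (Python) =====
-- def fewestOperationsToBalance(s):
--     # prefix-balance arithmetic: no stack, no matching.
--     # unmatched ')' = -(minimum prefix balance); unmatched '(' = total + that.
--     deltas = [1 if c == '(' else -1 if c == ')' else 0 for c in s]
--     total = sum(deltas)
--     bal = 0
--     low = 0
--     for d in deltas:
--         bal += d
--         if bal < low:
--             low = bal
--     closed = -low
--     opened = total + closed
--     return (opened > 0) + (closed > 0)
-- ===== Notes on version B (the rewrite author's own statement) =====
-- stated objective: alternative
-- what changed: Replaces the stack simulation plus a separate .count() pass by prefix-balance arithmetic: unmatched closers are recovered as the negated minimum prefix balance, unmatched openers as total balance plus that, and the 0/1/2 result is the count of nonzero residues instead of A's max/min decision tree.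
import Mathlib
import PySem

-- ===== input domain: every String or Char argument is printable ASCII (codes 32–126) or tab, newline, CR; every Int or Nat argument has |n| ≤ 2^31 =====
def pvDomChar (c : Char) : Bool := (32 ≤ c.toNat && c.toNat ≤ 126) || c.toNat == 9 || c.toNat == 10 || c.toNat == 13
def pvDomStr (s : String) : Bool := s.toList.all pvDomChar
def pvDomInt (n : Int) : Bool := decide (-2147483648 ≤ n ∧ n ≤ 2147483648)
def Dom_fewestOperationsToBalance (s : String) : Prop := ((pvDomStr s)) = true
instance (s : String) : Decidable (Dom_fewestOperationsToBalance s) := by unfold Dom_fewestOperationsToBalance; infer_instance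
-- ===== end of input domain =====

-- B drops A's stack simulation and extra count pass for prefix-balance arithmetic (alternative; same O(n)).

-- ===== PORT A =====
-- the for-loop over s maintaining the list rs
def loopA (rs : List Char) : List Char → List Char
  | [] => rs
  | c :: cs =>
    let rs1 := if c = '(' then rs ++ [c] else rs
    let rs2 :=
      if c = ')' then
        if rs1.length > 0 ∧ rs1.getLast? = some '(' then rs1.dropLast
        else rs1 ++ [c]
      else rs1
    loopA rs2 cs

def fewestOperationsToBalance (s : String) : Int :=
  let rs := loopA [] s.toList
  let a : Int := (rs.count ')' : Int)
  let b : Int := (rs.length : Int) - a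
  if a = b then
    if a = 0 then 0 else 2
  else
    let _a2 := max a b
    let b2 := min a b
    if b2 = 0 then 1 else 2

-- ===== PORT B =====
-- the delta comprehension
def deltasB (cs : List Char) : List Int :=
  cs.map (fun c => if c = '(' then 1 else if c = ')' then -1 else 0)

-- the for-loop over deltas maintaining (bal, low)
def loopB (st : Int × Int) : List Int → Int × Int
  | [] => st
  | d :: ds =>
    let bal := st.1 + d
    let low := if bal < st.2 then bal else st.2
    loopB (bal, low) ds

def fewestOperationsToBalance_alt (s : String) : Int :=
  let deltas := deltasB s.toList
  let total := deltas.sum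
  let st := loopB (0, 0) deltas
  let closed := -st.2
  let opened := total + closed
  (if opened > 0 then 1 else 0) + (if closed > 0 then 1 else 0)

-- ===== PRECONDITION & SPEC =====
def Spec_fewestOperationsToBalance (s : String) (out : Int) : Prop := out = fewestOperationsToBalance_alt s
instance (s : String) (out : Int) : Decidable (Spec_fewestOperationsToBalance s out) := by unfold Spec_fewestOperationsToBalance; infer_instance

-- ===== CLAIM =====
def Claim_equal_fewestOperationsToBalance : Prop := ∀ (s : String), Dom_fewestOperationsToBalance s → Spec_fewestOperationsToBalance s (fewestOperationsToBalance s)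

-- ===== LEMMAS AND PROOFS =====

lemma rep_snoc (k : ℕ) (a : Char) : List.replicate k a ++ [a] = a :: List.replicate k a := by
  rw [← List.replicate_succ', List.replicate_succ]

-- joint invariant: A's stack is `c` copies of ')' then `o` copies of '(',
-- while B's running balance is o - c, its running minimum is -c,
-- and the remaining deltas sum to the change of balance.
lemma loop_invariant : ∀ (cs : List Char) (o c : ℕ),
    ∃ o' c' : ℕ,
      loopA (List.replicate c ')' ++ List.replicate o '(') cs
        = List.replicate c' ')' ++ List.replicate o' '(' ∧
      loopB ((o : Int) - c, -(c : Int)) (deltasB cs) = ((o' : Int) - c', -(c' : Int)) ∧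
      (deltasB cs).sum = ((o' : Int) - c') - ((o : Int) - c) := by
  intro cs
  induction cs with
  | nil => intro o c; exact ⟨o, c, rfl, rfl, by simp [deltasB]⟩
  | cons ch cs ih =>
    intro o c
    by_cases h1 : ch = '('
    · subst h1
      have hA : loopA (List.replicate c ')' ++ List.replicate o '(') ('(' :: cs)
          = loopA (List.replicate c ')' ++ List.replicate (o + 1) '(') cs := by
        simp [loopA, rep_snoc]; rfl
      obtain ⟨o', c', hA', hB', hS'⟩ := ih (o + 1) c
      refine ⟨o', c', by rw [hA, hA'], ?_, ?_⟩
      · have hlt : ¬ ((o : Int) - c + 1 < -(c : Int)) := by omega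
        simp only [deltasB, List.map_cons, loopB, reduceIte]
        rw [if_neg hlt]
        have e1 : (o : Int) - c + 1 = (((o + 1 : ℕ)) : Int) - (c : Int) := by push_cast; ring
        rw [e1]; exact hB'
      · simp only [deltasB, List.map_cons, List.sum_cons, reduceIte] at hS' ⊢
        push_cast at hS' ⊢; omega
    · by_cases h2 : ch = ')'
      · subst h2
        cases o with
        | zero =>
          have hA : loopA (List.replicate c ')' ++ List.replicate 0 '(') (')' :: cs)
              = loopA (List.replicate (c + 1) ')') cs := by
            cases c with
            | zero => simp [loopA]
            | succ k =>
              simp [loopA, List.getLast?_replicate, rep_snoc]; rfl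
          obtain ⟨o', c', hA', hB', hS'⟩ := ih 0 (c + 1)
          refine ⟨o', c', ?_, ?_, ?_⟩
          · rw [hA]; simpa using hA'
          · simp only [deltasB, List.map_cons, loopB, if_neg h1, reduceIte, Nat.cast_zero]
            rw [if_pos (by omega : (0:Int) - c + -1 < -(c:Int))]
            have e1 : (0 : Int) - c + -1 = (((0:ℕ)) : Int) - (((c + 1 : ℕ)) : Int) := by push_cast; ring
            have e2 : (0 : Int) - c + -1 = -((((c + 1 : ℕ)) : Int)) := by push_cast; ring
            calc loopB ((0:Int) - c + -1, (0:Int) - c + -1) (deltasB cs)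
                = loopB ((((0:ℕ)) : Int) - (((c+1:ℕ)) : Int), -((((c+1:ℕ))) : Int)) (deltasB cs) := by
                  rw [← e1, ← e2]
              _ = ((o' : Int) - c', -(c' : Int)) := hB'
          · simp only [deltasB, List.map_cons, List.sum_cons, if_neg h1, reduceIte] at hS' ⊢
            push_cast at hS' ⊢; omega
        | succ k =>
          have hA : loopA (List.replicate c ')' ++ List.replicate (k + 1) '(') (')' :: cs)
              = loopA (List.replicate c ')' ++ List.replicate k '(') cs := by
            simp [loopA, List.getLast?_append, List.getLast?_replicate,
              List.dropLast_append_of_ne_nil]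
          obtain ⟨o', c', hA', hB', hS'⟩ := ih k c
          refine ⟨o', c', by rw [hA, hA'], ?_, ?_⟩
          · simp only [deltasB, List.map_cons, loopB, if_neg h1, reduceIte]
            have hlt : ¬ ((((k + 1 : ℕ)) : Int) - c + -1 < -(c : Int)) := by push_cast; omega
            rw [if_neg hlt]
            have e1 : (((k + 1 : ℕ)) : Int) - c + -1 = ((k : ℕ) : Int) - c := by push_cast; ring
            rw [e1]; exact hB'
          · simp only [deltasB, List.map_cons, List.sum_cons, if_neg h1, reduceIte] at hS' ⊢
            push_cast at hS' ⊢; omega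
      · have hA : loopA (List.replicate c ')' ++ List.replicate o '(') (ch :: cs)
            = loopA (List.replicate c ')' ++ List.replicate o '(') cs := by
          simp [loopA, h1, h2]
        obtain ⟨o', c', hA', hB', hS'⟩ := ih o c
        refine ⟨o', c', by rw [hA, hA'], ?_, ?_⟩
        · simp only [deltasB, List.map_cons, loopB, if_neg h1, if_neg h2]
          have hlt : ¬ ((o : Int) - c + 0 < -(c : Int)) := by omega
          rw [if_neg hlt]
          simpa using hB'
        · simp only [deltasB, List.map_cons, List.sum_cons, if_neg h1, if_neg h2] at hS' ⊢
          omega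

-- ===== VERDICT =====
theorem fewestOperationsToBalance_spec : Claim_equal_fewestOperationsToBalance := by
  unfold Claim_equal_fewestOperationsToBalance Spec_fewestOperationsToBalance
  intro s _
  obtain ⟨o', c', hA, hB, hS⟩ := loop_invariant s.toList 0 0
  simp only [List.replicate, List.nil_append, Nat.cast_zero, sub_zero, neg_zero] at hA hB hS
  simp only [fewestOperationsToBalance, fewestOperationsToBalance_alt]
  rw [hA, hB, hS]
  have hcount : (List.replicate c' ')' ++ List.replicate o' '(').count ')' = c' := by
    simp [List.count_append, List.count_replicate]
  have hlen : (List.replicate c' ')' ++ List.replicate o' '(').length = c' + o' := by simp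
  simp only [hcount, hlen]
  push_cast
  split_ifs <;> omega
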